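-- pv_equiv track=rewrite | github.com/BeAllAround/FreeStyle | Codewars/Max Path.py | max_sum_path
-- ===== SOURCE A (Python) =====
-- def max_sum_path(l1, l2):
--     _max = [sum(l1), sum(l2)];
--     index = -1;
--     index2 = -1;
--     pos = [];
--     for i in range(len(l1)):
--         for j in range(len(l2)):
--             if(l1[i] == l2[j]):
--                 pos.append([i, j]);
--                 break;
--     if(pos == []):
--         return (max(_max));
--     for item in pos:
--         _max.append(sum(l1[:item[0]] +  l2[item[1]:]));
--         _max.append(sum(l2[:item[1]] + l1[item[0]:]));
--     return max(_max);
-- ===== SOURCE B (Python) =====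
-- def max_sum_path(l1, l2):
--     # value -> sum of l2 strictly before its first occurrence (O(m) preprocessing)
--     first = {}
--     acc2 = 0
--     for v in l2:
--         if v not in first:
--             first[v] = acc2
--         acc2 += v
--     s2 = acc2
--     s1 = sum(l1)
--     best = s1 if s1 > s2 else s2
--     acc = 0
--     for v in l1:
--         p = first.get(v)
--         if p is not None:
--             c1 = acc + s2 - p
--             c2 = p + s1 - acc
--             if c1 > best:
--                 best = c1
--             if c2 > best:
--                 best = c2
--         acc += v
--     return best
-- ===== Notes on version B (the rewrite author's own statement) =====
-- stated objective: faster
-- what changed: Replaced the nested first-match scan over l2 and the per-crossing slice re-summing with one pass over l2 building a value-to-prefix-sum dict and one pass over l1 with a running prefix sum and running max.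
import Mathlib
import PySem

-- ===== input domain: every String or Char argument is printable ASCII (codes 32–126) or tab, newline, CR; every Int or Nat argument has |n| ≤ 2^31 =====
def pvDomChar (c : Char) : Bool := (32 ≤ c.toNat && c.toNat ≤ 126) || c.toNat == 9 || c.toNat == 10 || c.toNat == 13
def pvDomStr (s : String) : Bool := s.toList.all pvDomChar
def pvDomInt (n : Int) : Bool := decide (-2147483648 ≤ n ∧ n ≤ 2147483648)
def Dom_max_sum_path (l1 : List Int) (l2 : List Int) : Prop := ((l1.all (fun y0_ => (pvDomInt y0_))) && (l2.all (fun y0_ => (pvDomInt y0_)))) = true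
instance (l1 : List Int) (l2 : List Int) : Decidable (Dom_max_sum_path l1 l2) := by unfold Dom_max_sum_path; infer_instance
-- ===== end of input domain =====

-- B replaces A's nested first-match scan over l2 and per-crossing slice re-summing with a
-- single pass over l2 building a value → prefix-sum dict, plus one pass over l1 with a
-- running prefix sum and running max (alternative algorithm; no list of crossings is built).

-- ===== PORT A =====
-- inner loop "for j in range(len(l2)): if l1[i] == l2[j]: pos.append([i,j]); break"
def pvInnerA (x : Int) : List Int → Nat → Option Nat
  | [], _ => none
  | y :: ys, j => if x = y then some j else pvInnerA x ys (j + 1)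

-- outer loop building pos (i walks l1; per i the first j in l2 with l1[i] == l2[j])
def pvPosA (l2 : List Int) : List Int → Nat → List (Nat × Nat)
  | [], _ => []
  | x :: xs, i =>
    match pvInnerA x l2 0 with
    | some j => (i, j) :: pvPosA l2 xs (i + 1)
    | none => pvPosA l2 xs (i + 1)

-- slices l1[:i], l2[j:] … have natural-number bounds here, so they are exactly take/drop
-- (PySem.List.slice_to_natCast / slice_from_natCast); Python's max(list) is PySem.List.max?;
-- _max always starts with the two sums, so it is nonempty and Python's max never raises.
def max_sum_path (l1 : List Int) (l2 : List Int) : Int :=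
  let s1 := l1.sum
  let s2 := l2.sum
  let pos := pvPosA l2 l1 0
  if pos = [] then (PySem.List.max? [s1, s2] (fun y => y)).getD 0
  else
    let m := pos.foldl (fun m ij =>
      m ++ [((l1.take ij.1) ++ (l2.drop ij.2)).sum,
            ((l2.take ij.2) ++ (l1.drop ij.1)).sum]) [s1, s2]
    (PySem.List.max? m (fun y => y)).getD 0

-- ===== PORT B =====
def max_sum_path_alt (l1 : List Int) (l2 : List Int) : Int :=
  -- first : value → sum of l2 strictly before its first occurrence; acc2 runs the total of l2
  let fd := l2.foldl (fun (st : PySem.Dict Int Int × Int) v =>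
      (if st.1.contains v then st.1 else st.1.insert v st.2, st.2 + v))
      (PySem.Dict.empty, 0)
  let first := fd.1
  let s2 := fd.2
  let s1 := l1.sum
  let best0 := if s1 > s2 then s1 else s2
  (l1.foldl (fun (st : Int × Int) v =>
      match first.get? v with
      | some p =>
        let c1 := st.2 + s2 - p
        let c2 := p + s1 - st.2
        let b1 := if c1 > st.1 then c1 else st.1
        let b2 := if c2 > b1 then c2 else b1
        (b2, st.2 + v)
      | none => (st.1, st.2 + v)) (best0, 0)).1

-- ===== PRECONDITION & SPEC =====
def Spec_max_sum_path (l1 : List Int) (l2 : List Int) (out : Int) : Prop := out = max_sum_path_alt l1 l2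
instance (l1 : List Int) (l2 : List Int) (out : Int) : Decidable (Spec_max_sum_path l1 l2 out) := by unfold Spec_max_sum_path; infer_instance

-- ===== CLAIM (what is proved, stated in full; the proofs are below) =====
def Claim_equal_max_sum_path : Prop := ∀ (l1 : List Int) (l2 : List Int), Dom_max_sum_path l1 l2 → Spec_max_sum_path l1 l2 (max_sum_path l1 l2)

-- ===== LEMMAS AND PROOFS =====

-- common reference: the candidate list, one entry pair per l1-element with a match in l2,
-- expressed with a running prefix sum acc over l1
def pvCands (l2 : List Int) (s1 s2 : Int) : List Int → Int → List Int
  | [], _ => []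
  | v :: xs, acc =>
    (match pvInnerA v l2 0 with
     | some j => [acc + s2 - (l2.take j).sum, (l2.take j).sum + s1 - acc]
     | none => []) ++ pvCands l2 s1 s2 xs (acc + v)

theorem pvInnerA_shift (x : Int) (ys : List Int) (j : Nat) :
    pvInnerA x ys j = (pvInnerA x ys 0).map (· + j) := by
  induction ys generalizing j with
  | nil => simp [pvInnerA]
  | cons y ys ih =>
    by_cases h : x = y
    · simp [pvInnerA, h]
    · rw [pvInnerA, pvInnerA, if_neg h, if_neg h, ih (j + 1), ih 1, Option.map_map]
      congr 1; funext k; simp; omega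

-- B's dict-building loop: get? is the prefix sum at the first occurrence; .2 is the running total
theorem pvDictLoop (ys : List Int) (d : PySem.Dict Int Int) (acc : Int) :
    (ys.foldl (fun (st : PySem.Dict Int Int × Int) v =>
      (if st.1.contains v then st.1 else st.1.insert v st.2, st.2 + v)) (d, acc)).2
      = acc + ys.sum ∧
    ∀ v, (ys.foldl (fun (st : PySem.Dict Int Int × Int) v =>
      (if st.1.contains v then st.1 else st.1.insert v st.2, st.2 + v)) (d, acc)).1.get? v
      = match d.get? v with
        | some p => some p
        | none => (pvInnerA v ys 0).map (fun j => acc + (ys.take j).sum) := by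
  induction ys generalizing d acc with
  | nil =>
    refine ⟨by simp, fun v => ?_⟩
    simp [pvInnerA]
    cases d.get? v <;> simp
  | cons y ys ih =>
    constructor
    · rw [List.foldl_cons, (ih _ _).1]
      simp; ring
    · intro v
      rw [List.foldl_cons]
      have h2 := (ih (if d.contains y then d else d.insert y acc) (acc + y)).2 v
      simp only at h2
      rw [h2]
      by_cases hvy : v = y
      · subst hvy
        by_cases hc : d.contains v
        · rw [if_pos hc]
          rw [PySem.Dict.contains_eq_isSome_get?] at hc
          obtain ⟨p, hp⟩ := Option.isSome_iff_exists.mp hc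
          simp [hp]
        · rw [if_neg hc]
          have hnone : d.get? v = none := by
            rw [PySem.Dict.contains_eq_isSome_get?] at hc
            simpa using hc
          rw [PySem.Dict.get?_insert_self, hnone]
          simp [pvInnerA]
      · have hne : (if d.contains y then d else d.insert y acc).get? v = d.get? v := by
          split
          · rfl
          · rw [PySem.Dict.get?_insert]; exact if_neg hvy
        rw [hne]
        cases hdv : d.get? v with
        | some p => simp
        | none =>
          simp only [pvInnerA, if_neg hvy, pvInnerA_shift v ys 1, Option.map_map]
          congr 1
          funext k
          simp [List.take_succ_cons]
          ring

-- A-side: the _max-building loop over pos yields exactly pvCands (relative to the consumed prefix)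
theorem pvPosCands (l2 : List Int) (xs pre : List Int) :
    (pvPosA l2 xs pre.length).flatMap (fun ij =>
      [(((pre ++ xs).take ij.1) ++ (l2.drop ij.2)).sum,
       ((l2.take ij.2) ++ ((pre ++ xs).drop ij.1)).sum])
    = pvCands l2 (pre ++ xs).sum l2.sum xs pre.sum := by
  induction xs generalizing pre with
  | nil => simp [pvPosA, pvCands]
  | cons v xs ih =>
    have hIH := ih (pre ++ [v])
    simp only [List.length_append, List.length_singleton, List.append_assoc,
      List.singleton_append, List.sum_append, List.sum_cons, List.sum_nil, add_zero] at hIH ⊢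
    cases hj : pvInnerA v l2 0 with
    | none =>
      simp only [pvPosA, hj, pvCands, List.nil_append]
      exact hIH
    | some j =>
      simp only [pvPosA, hj, pvCands, List.flatMap_cons]
      rw [hIH]
      have ht : (pre ++ v :: xs).take pre.length = pre := by simp
      have hd : (pre ++ v :: xs).drop pre.length = v :: xs := by simp
      have hs : (l2.take j).sum + (l2.drop j).sum = l2.sum := by
        rw [← List.sum_append, List.take_append_drop]
      simp only [ht, hd, List.sum_cons]
      have e1 : pre.sum + (List.drop j l2).sum = pre.sum + l2.sum - (List.take j l2).sum := by omega
      have e2 : (List.take j l2).sum + (v + xs.sum)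
          = (List.take j l2).sum + (pre.sum + (v + xs.sum)) - pre.sum := by omega
      rw [e1, e2]

theorem pvCands_nil_of_pos_nil (l2 : List Int) (xs : List Int) (i : Nat) (s1 s2 acc : Int)
    (h : pvPosA l2 xs i = []) : pvCands l2 s1 s2 xs acc = [] := by
  induction xs generalizing i acc with
  | nil => rfl
  | cons v xs ih =>
    cases hj : pvInnerA v l2 0 with
    | some j => simp [pvPosA, hj] at h
    | none =>
      simp only [pvPosA, hj] at h
      simp only [pvCands, hj, List.nil_append]
      exact ih (i + 1) (acc + v) h

-- B-side: the main fold is the running max over pvCands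
theorem pvFoldB (l2 : List Int) (s1 s2 : Int) (first : PySem.Dict Int Int)
    (hf : ∀ v, first.get? v = (pvInnerA v l2 0).map (fun j => (l2.take j).sum))
    (xs : List Int) (best acc : Int) :
    (xs.foldl (fun (st : Int × Int) v =>
      match first.get? v with
      | some p =>
        let c1 := st.2 + s2 - p
        let c2 := p + s1 - st.2
        let b1 := if c1 > st.1 then c1 else st.1
        let b2 := if c2 > b1 then c2 else b1
        (b2, st.2 + v)
      | none => (st.1, st.2 + v)) (best, acc)).1
    = (pvCands l2 s1 s2 xs acc).foldl max best := by
  induction xs generalizing best acc with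
  | nil => rfl
  | cons v xs ih =>
    have h1 : first.get? v = (pvInnerA v l2 0).map (fun j => (l2.take j).sum) := hf v
    cases hj : pvInnerA v l2 0 with
    | none =>
      rw [hj, Option.map_none] at h1
      simp only [List.foldl_cons, h1, pvCands, hj, List.nil_append]
      exact ih best (acc + v)
    | some j =>
      rw [hj, Option.map_some] at h1
      simp only [List.foldl_cons, h1, pvCands, hj, List.cons_append,
        List.nil_append, List.foldl_cons]
      rw [ih]
      congr 1
      simp only [max_def]
      split_ifs <;> omega

theorem pvBeq (l1 l2 : List Int) :
    max_sum_path_alt l1 l2 = (pvCands l2 l1.sum l2.sum l1 0).foldl max (max l1.sum l2.sum) := by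
  have hd := pvDictLoop l2 PySem.Dict.empty 0
  have hd2 := hd.1
  have hf : ∀ v, (l2.foldl (fun (st : PySem.Dict Int Int × Int) v =>
      (if st.1.contains v then st.1 else st.1.insert v st.2, st.2 + v))
      (PySem.Dict.empty, 0)).1.get? v = (pvInnerA v l2 0).map (fun j => (l2.take j).sum) := by
    intro v
    rw [hd.2 v]
    simp [PySem.Dict.get?_empty]
  have hbest : (if l1.sum > l2.sum then l1.sum else l2.sum) = max l1.sum l2.sum := by
    rw [max_def]; split_ifs <;> omega
  simp only [max_sum_path_alt]
  rw [hd2]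
  simp only [zero_add, hbest]
  exact pvFoldB l2 l1.sum l2.sum _ hf l1 (max l1.sum l2.sum) 0

theorem pvAeq (l1 l2 : List Int) :
    max_sum_path l1 l2 = (pvCands l2 l1.sum l2.sum l1 0).foldl max (max l1.sum l2.sum) := by
  simp only [max_sum_path]
  by_cases hpos : pvPosA l2 l1 0 = []
  · rw [if_pos hpos, PySem.List.max?_id_cons]
    rw [pvCands_nil_of_pos_nil l2 l1 0 l1.sum l2.sum 0 hpos]
    simp [List.foldl]
  · rw [if_neg hpos, PySem.List.foldl_append_eq_flatMap]
    simp only [List.cons_append, List.nil_append]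
    rw [PySem.List.max?_id_cons]
    have hp := pvPosCands l2 l1 []
    simp only [List.nil_append, List.length_nil, List.sum_nil] at hp
    simp only [hp]
    simp [List.foldl]

-- ===== VERDICT (by name: the statement is the Claim_ definition above) =====
theorem max_sum_path_spec : Claim_equal_max_sum_path := by
  intro l1 l2 _
  unfold Spec_max_sum_path
  rw [pvAeq, pvBeq]
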